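-- pv_equiv track=rewrite | github.com/benquick123/code-profiling | code/batch-2/vse-naloge-brez-testov/DN10-M-010.py | najbogatejsi
-- ===== SOURCE A (Python) =====
-- otroci = {
--     "Adam": ["Matjaž", "Cilka", "Daniel"],
--     "Aleksander": [],
--     "Alenka": [],
--     "Barbara": [],
--     "Cilka": [],
--     "Daniel": ["Elizabeta", "Hans"],
--     "Erik": [],
--     "Elizabeta": ["Ludvik", "Jurij", "Barbara"],
--     "Franc": [],
--     "Herman": ["Margareta"],
--     "Hans": ["Herman", "Erik"],
--     "Jožef": ["Alenka", "Aleksander", "Petra"],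
--     "Jurij": ["Franc", "Jožef"],
--     "Ludvik": [],
--     "Margareta": [],
--     "Matjaž": ["Viljem"],
--     "Petra": [],
--     "Tadeja": [],
--     "Viljem": ["Tadeja"],
-- }
--
-- def najbogatejsi(oseba, denar):
--     max = (oseba, denar[oseba])
--     if not otroci[oseba]:
--         return (oseba, denar[oseba])
--     elif otroci[oseba]:
--         for o in otroci[oseba]:
--             if denar[o] > denar[oseba]:
--                 max_n = najbogatejsi(o, denar)
--             else:
--                 continue
--             if max[1] < max_n[1]:
--                 max = max_n
--         return max
-- ===== SOURCE B (Python) =====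
-- otroci = {
--     "Adam": ["Matjaž", "Cilka", "Daniel"],
--     "Aleksander": [],
--     "Alenka": [],
--     "Barbara": [],
--     "Cilka": [],
--     "Daniel": ["Elizabeta", "Hans"],
--     "Erik": [],
--     "Elizabeta": ["Ludvik", "Jurij", "Barbara"],
--     "Franc": [],
--     "Herman": ["Margareta"],
--     "Hans": ["Herman", "Erik"],
--     "Jožef": ["Alenka", "Aleksander", "Petra"],
--     "Jurij": ["Franc", "Jožef"],
--     "Ludvik": [],
--     "Margareta": [],
--     "Matjaž": ["Viljem"],
--     "Petra": [],
--     "Tadeja": [],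
--     "Viljem": ["Tadeja"],
-- }
--
-- def najbogatejsi(oseba, denar):
--     # Iterative preorder DFS with an explicit stack and one running best.
--     best = (oseba, denar[oseba])
--     stack = [oseba]
--     while stack:
--         node = stack.pop()
--         d = denar[node]
--         if d > best[1]:
--             best = (node, d)
--         # push qualifying children in reverse so they are visited in order
--         for child in reversed(otroci[node]):
--             if denar[child] > d:
--                 stack.append(child)
--     return best
-- ===== Notes on version B (the rewrite author's own statement) =====
-- stated objective: alternative
-- what changed: The pruned recursion (each call combining its children's recursive bests with a strict compare) is replaced by an iterative preorder DFS: an explicit stack of pending nodes and a single running best updated strictly, pushing qualifying children in reverse so ties still go to the first node in preorder.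
-- outside the precondition, e.g. on najbogatejsi('Hans', {'Hans': 5, 'Herman': 3, 'Erik': 1}): A returns ('Hans', 5), B returns ('Hans', 5)
import Mathlib
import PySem

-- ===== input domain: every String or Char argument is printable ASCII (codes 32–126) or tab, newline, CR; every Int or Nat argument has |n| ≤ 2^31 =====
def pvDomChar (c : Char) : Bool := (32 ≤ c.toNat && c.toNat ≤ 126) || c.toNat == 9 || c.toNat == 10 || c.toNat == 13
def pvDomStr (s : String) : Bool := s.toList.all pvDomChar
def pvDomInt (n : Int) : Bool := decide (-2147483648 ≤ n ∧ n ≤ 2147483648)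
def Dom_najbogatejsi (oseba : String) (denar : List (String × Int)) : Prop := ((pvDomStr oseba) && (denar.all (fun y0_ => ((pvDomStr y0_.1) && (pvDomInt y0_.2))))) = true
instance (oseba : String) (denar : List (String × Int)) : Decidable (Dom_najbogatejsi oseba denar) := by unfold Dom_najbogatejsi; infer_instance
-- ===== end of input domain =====

-- B replaces A's recursion (per-child recursive best combined with a strict compare) by an
-- iterative preorder DFS with an explicit stack and one running best; same cost, no recursion.

-- ===== PORT A =====
-- the module-level constant 'otroci' as a lookup (otroci[s]); for s not a key Python raises
-- KeyError — those inputs are excluded by Pre_; here the lookup returns [] there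
def kidsA (s : String) : List String :=
  if s = "Adam" then ["Matjaž", "Cilka", "Daniel"]
  else if s = "Daniel" then ["Elizabeta", "Hans"]
  else if s = "Elizabeta" then ["Ludvik", "Jurij", "Barbara"]
  else if s = "Herman" then ["Margareta"]
  else if s = "Hans" then ["Herman", "Erik"]
  else if s = "Jožef" then ["Alenka", "Aleksander", "Petra"]
  else if s = "Jurij" then ["Franc", "Jožef"]
  else if s = "Matjaž" then ["Viljem"]
  else if s = "Viljem" then ["Tadeja"]
  else []

-- static subtree size in the 'otroci' tree (same if-chain order as kidsA); used ONLY as the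
-- termination measure of the two ports and of the proof helper 'pre'
def size (s : String) : Nat :=
  if s = "Adam" then 19
  else if s = "Daniel" then 14
  else if s = "Elizabeta" then 9
  else if s = "Herman" then 2
  else if s = "Hans" then 4
  else if s = "Jožef" then 4
  else if s = "Jurij" then 6
  else if s = "Matjaž" then 3
  else if s = "Viljem" then 2
  else 1

theorem size_pos : ∀ n : String, 1 ≤ size n := by
  intro n; unfold size; split_ifs <;> decide

theorem mem_kids_size : ∀ (n o : String), o ∈ kidsA n → size o < size n := by
  intro n o h
  unfold kidsA at h
  split_ifs at h <;> first
    | exact absurd h (List.not_mem_nil)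
    | (subst_vars; fin_cases h <;> simp [size])

theorem sum_kids_size : ∀ n : String, ((kidsA n).map size).sum < size n := by
  intro n
  unfold kidsA
  split_ifs <;> first
    | (simp only [List.map_nil, List.sum_nil]; exact size_pos n)
    | (subst_vars; simp [size])

theorem sub_sum (p : String → Bool) (l : List String) :
    ((l.filter p).map size).sum ≤ (l.map size).sum :=
  List.Sublist.sum_le_sum ((List.filter_sublist (l := l)).map size)
    (by intro a _; exact Nat.zero_le a)

-- denar[k]: Python dict lookup = first match in the association list; a missing key is a
-- KeyError in Python, excluded by Pre_; here it returns 0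
def dget (denar : List (String × Int)) (k : String) : Int :=
  ((denar.find? (fun p => p.1 == k)).map Prod.snd).getD 0

-- 'max' (the running best) is the fold accumulator, initialized to (oseba, denar[oseba]);
-- 'max_n' is the recursive result of the qualifying child
def najbogatejsi (oseba : String) (denar : List (String × Int)) : String × Int :=
  if kidsA oseba = [] then (oseba, dget denar oseba)
  else
    (kidsA oseba).attach.foldl
      (fun mx o =>
        if dget denar o.1 > dget denar oseba then
          let mx_n := najbogatejsi o.1 denar
          if mx.2 < mx_n.2 then mx_n else mx
        else mx) (oseba, dget denar oseba)
termination_by size oseba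
decreasing_by exact mem_kids_size _ _ o.2

-- ===== PORT B =====
-- the while-loop of Source B; the Python stack's top is the END of the list, modeled here as the
-- HEAD, so 'append the reversed qualifying children' becomes 'cons the qualifying children in
-- order', i.e. 'filter ++ st'; d = denar[node], and the last argument is the updated best
def loopB (denar : List (String × Int)) : List String → (String × Int) → (String × Int)
  | [], best => best
  | node :: st, best =>
    loopB denar
      (((kidsA node).filter (fun c => dget denar c > dget denar node)) ++ st)
      (if dget denar node > best.2 then (node, dget denar node) else best)
termination_by st _ => (st.map size).sum
decreasing_by
  simp only [List.map_append, List.sum_append, List.map_cons, List.sum_cons]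
  have h1 := sub_sum (fun c => dget denar c > dget denar node) (kidsA node)
  have h2 := sum_kids_size node
  omega

def najbogatejsi_alt (oseba : String) (denar : List (String × Int)) : String × Int :=
  loopB denar [oseba] (oseba, dget denar oseba)

-- ===== PRECONDITION & SPEC =====
def famNames : List String :=
  ["Adam", "Aleksander", "Alenka", "Barbara", "Cilka", "Daniel", "Erik", "Elizabeta",
   "Franc", "Herman", "Hans", "Jožef", "Jurij", "Ludvik", "Margareta", "Matjaž",
   "Petra", "Tadeja", "Viljem"]

-- all descendants of s in the static 'otroci' tree
def descT (s : String) : List String :=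
  if s = "Adam" then ["Matjaž", "Viljem", "Tadeja", "Cilka", "Daniel", "Elizabeta", "Ludvik",
    "Jurij", "Franc", "Jožef", "Alenka", "Aleksander", "Petra", "Barbara", "Hans", "Herman",
    "Margareta", "Erik"]
  else if s = "Daniel" then ["Elizabeta", "Ludvik", "Jurij", "Franc", "Jožef", "Alenka",
    "Aleksander", "Petra", "Barbara", "Hans", "Herman", "Margareta", "Erik"]
  else if s = "Elizabeta" then ["Ludvik", "Jurij", "Franc", "Jožef", "Alenka", "Aleksander",
    "Petra", "Barbara"]
  else if s = "Herman" then ["Margareta"]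
  else if s = "Hans" then ["Herman", "Margareta", "Erik"]
  else if s = "Jožef" then ["Alenka", "Aleksander", "Petra"]
  else if s = "Jurij" then ["Franc", "Jožef", "Alenka", "Aleksander", "Petra"]
  else if s = "Matjaž" then ["Viljem", "Tadeja"]
  else if s = "Viljem" then ["Tadeja"]
  else []

-- Pre_ excludes inputs where Python A raises KeyError (oseba not a key of otroci, or a looked-up
-- name missing from denar); it asks for ALL static descendants of oseba to be in denar, so it
-- also excludes some inputs on which A returns because a missing name lies only in a subtree the
-- value-dependent pruning happens to skip — stating the visited set exactly would replay the
-- algorithm, and A and B behave identically there anyway.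
def Pre_najbogatejsi (oseba : String) (denar : List (String × Int)) : Prop :=
  (famNames.contains oseba
    && (oseba :: descT oseba).all (fun n => denar.any (fun p => p.1 == n))) = true

instance (oseba : String) (denar : List (String × Int)) : Decidable (Pre_najbogatejsi oseba denar) := by
  unfold Pre_najbogatejsi; infer_instance

def pvWitness_najbogatejsi : String × (List (String × Int)) :=
  ("Hans", [("Hans", 1), ("Herman", 2), ("Margareta", 3), ("Erik", 4)])

def Spec_najbogatejsi (oseba : String) (denar : List (String × Int)) (out : String × Int) : Prop := out = najbogatejsi_alt oseba denar
instance (oseba : String) (denar : List (String × Int)) (out : String × Int) : Decidable (Spec_najbogatejsi oseba denar out) := by unfold Spec_najbogatejsi; infer_instance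

-- ===== CLAIM (what is proved, stated in full; the proofs are below) =====
def Claim_equal_najbogatejsi : Prop := ∀ (oseba : String) (denar : List (String × Int)), Dom_najbogatejsi oseba denar → Pre_najbogatejsi oseba denar → Spec_najbogatejsi oseba denar (najbogatejsi oseba denar)

-- ===== LEMMAS AND PROOFS =====

-- the running-best update: one preorder step
def updN (denar : List (String × Int)) (m : String × Int) (c : String) : String × Int :=
  if dget denar c > m.2 then (c, dget denar c) else m

-- the preorder list of visited nodes (root, then the subtrees of the qualifying children, in order)
def pre (denar : List (String × Int)) (n : String) : List String :=
  n :: ((kidsA n).filter (fun c => dget denar c > dget denar n)).attach.flatMap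
        (fun c => pre denar c.1)
termination_by size n
decreasing_by exact mem_kids_size _ _ (List.mem_filter.1 c.2).1

theorem foldl_attach_val {α β : Type} (l : List α) (f : β → α → β) (b : β) :
    l.attach.foldl (fun acc x => f acc x.1) b = l.foldl f b := by
  rw [← List.foldl_map, List.attach_map_subtype_val]

theorem flatMap_attach_val {α β : Type} (l : List α) (f : α → List β) :
    l.attach.flatMap (fun x => f x.1) = l.flatMap f := by
  conv_rhs => rw [← List.attach_map_subtype_val l]
  rw [List.flatMap_map]

theorem pre_eq (denar : List (String × Int)) (n : String) :
    pre denar n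
    = n :: ((kidsA n).filter (fun c => dget denar c > dget denar n)).flatMap (pre denar) := by
  rw [pre]
  congr 1
  exact flatMap_attach_val _ _

theorem updN_self' (denar : List (String × Int)) (n : String) :
    updN denar (n, dget denar n) n = (n, dget denar n) := by
  simp [updN]

-- two consecutive updates, re-associated
theorem updN_updN (denar : List (String × Int)) (m : String × Int) (x y : String) :
    updN denar (updN denar m x) y
    = if dget denar y > dget denar x then updN denar m y else updN denar m x := by
  by_cases h1 : dget denar x > m.2
  · have e1 : updN denar m x = (x, dget denar x) := by simp [updN, h1]
    rw [e1]
    by_cases h2 : dget denar y > dget denar x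
    · have h3 : dget denar y > m.2 := lt_trans h1 h2
      simp [updN, h2, h3]
    · simp [updN, h2]
  · have e1 : updN denar m x = m := by simp [updN, h1]
    rw [e1]
    by_cases h2 : dget denar y > dget denar x
    · simp [updN, h2]
    · have h3 : ¬ dget denar y > m.2 := by omega
      simp [updN, h2, h3]

-- A's per-child combine (strict compare with the child's subtree best) equals folding the
-- running best through the child's whole preorder list
theorem L1 (denar : List (String × Int)) :
    ∀ (l : List String) (m : String × Int) (x : String),
      (if m.2 < (l.foldl (updN denar) (x, dget denar x)).2
       then l.foldl (updN denar) (x, dget denar x) else m)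
      = (x :: l).foldl (updN denar) m := by
  intro l
  induction l with
  | nil =>
    intro m x
    simp [updN]
  | cons y l ih =>
    intro m x
    simp only [List.foldl_cons]
    by_cases hxy : dget denar y > dget denar x
    · have e1 : updN denar (x, dget denar x) y = (y, dget denar y) := by simp [updN, hxy]
      rw [e1]
      have h2 := ih m y
      simp only [List.foldl_cons] at h2
      rw [h2, updN_updN, if_pos hxy]
    · have e1 : updN denar (x, dget denar x) y = (x, dget denar x) := by
        simp only [updN]; rw [if_neg]; simpa using hxy
      rw [e1]
      have h2 := ih m x
      simp only [List.foldl_cons] at h2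
      rw [h2, updN_updN, if_neg hxy]

-- folding the loop body 'if qualifying then sweep the child's preorder list' over the children
-- equals one sweep over the concatenation of the qualifying children's preorder lists
theorem fold_flat (denar : List (String × Int)) (q : String → Bool) :
    ∀ (l : List String) (init : String × Int),
      l.foldl (fun mx c => if q c then (pre denar c).foldl (updN denar) mx else mx) init
      = ((l.filter q).flatMap (pre denar)).foldl (updN denar) init := by
  intro l
  induction l with
  | nil => intro init; rfl
  | cons c l ih =>
    intro init
    simp only [List.foldl_cons, List.filter_cons]
    by_cases hq : q c
    · simp only [hq, if_true, List.flatMap_cons, List.foldl_append]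
      exact ih _
    · simp only [hq, Bool.false_eq_true, if_false]
      exact ih _

-- A computes the preorder sweep
theorem A_char : ∀ (k : Nat) (n : String) (denar : List (String × Int)), size n ≤ k →
    najbogatejsi n denar = (pre denar n).foldl (updN denar) (n, dget denar n) := by
  intro k
  induction k with
  | zero => intro n denar h; exact absurd h (by have := size_pos n; omega)
  | succ k ih =>
    intro n denar hk
    rw [najbogatejsi]
    by_cases hnil : kidsA n = []
    · rw [pre_eq]
      simp [hnil, updN_self']
    · rw [if_neg hnil]
      refine Eq.trans
        (foldl_attach_val (kidsA n)
          (fun (mx : String × Int) (c : String) =>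
            if dget denar c > dget denar n then
              let mx_n := najbogatejsi c denar
              if mx.2 < mx_n.2 then mx_n else mx
            else mx) (n, dget denar n)) ?_
      rw [PySem.List.foldl_congr_mem (kidsA n) _
            (fun (mx : String × Int) (c : String) =>
              if (dget denar c > dget denar n : Bool) then (pre denar c).foldl (updN denar) mx else mx)
            (n, dget denar n) ?_]
      · rw [fold_flat, pre_eq denar n, List.foldl_cons, updN_self']
      · intro mx c hc
        by_cases hq : dget denar c > dget denar n
        · simp only [hq, if_true, decide_true]
          have hsz : size c ≤ k := by have := mem_kids_size n c hc; omega
          rw [ih c denar hsz, pre_eq denar c, List.foldl_cons, List.foldl_cons, updN_self']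
          exact L1 denar _ mx c
        · simp [hq]

-- the stack loop sweeps the concatenated preorder lists of the stack entries
theorem B_char : ∀ (k : Nat) (denar : List (String × Int)) (st : List String)
    (best : String × Int), (st.map size).sum ≤ k →
    loopB denar st best = (st.flatMap (pre denar)).foldl (updN denar) best := by
  intro k
  induction k with
  | zero =>
    intro denar st best h
    cases st with
    | nil => simp [loopB]
    | cons n st => exact absurd h (by simp; have := size_pos n; omega)
  | succ k ih =>
    intro denar st best hk
    cases st with
    | nil => simp [loopB]
    | cons node st =>
      rw [loopB]
      have hlt : ((((kidsA node).filter (fun c => dget denar c > dget denar node)) ++ st).map size).sum ≤ k := by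
        have h1 := sub_sum (fun c => dget denar c > dget denar node) (kidsA node)
        have h2 := sum_kids_size node
        simp only [List.map_append, List.sum_append] at h1 ⊢
        simp only [List.map_cons, List.sum_cons] at hk
        omega
      rw [ih _ _ _ hlt]
      simp only [List.flatMap_append, List.flatMap_cons, List.foldl_append, pre_eq denar node,
        List.foldl_cons]
      rfl

-- ===== VERDICT (by name: the statement is the Claim_ definition above) =====
theorem najbogatejsi_spec : Claim_equal_najbogatejsi := by
  intro oseba denar _ _
  unfold Spec_najbogatejsi najbogatejsi_alt
  rw [B_char ((([oseba] : List String).map size).sum) denar [oseba] _ le_rfl,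
      A_char (size oseba) oseba denar le_rfl]
  simp
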